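-- pv_equiv track=rewrite | github.com/pypi-data/pypi-mirror-396 | packages/project-sunrise/project_sunrise-0.1.0.tar.gz/project_sunrise-0.1.0/src/sunrise/fermionic_operations/givens_rotations.py | depth_eff_order_mf
-- ===== SOURCE A (Python) =====
-- def depth_eff_order_mf(N:int)->list:
--     """
--     Returns index ordering for linear depth circuit
--
--     For example N = 6 gives elimination order
--     [ 0.  0.  0.  0.  0.  0.]
--     [ 7.  0.  0.  0.  0.  0.]
--     [ 5. 10.  0.  0.  0.  0.]
--     [ 3.  8. 12.  0.  0.  0.]
--     [ 2.  6. 11. 14.  0.  0.]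
--     [ 1.  4.  9. 13. 15.  0.]
--     """
--     l = []
--     for c in range(0, N - 1):
--         for r in range(1, N):
--             if r - c > 0:
--                 l.append([r, c, 2 * c - r + N])
--     l.sort(key=lambda x: x[2])
--     return [(a[0], a[1]) for a in l]
-- ===== SOURCE B (Python) =====
-- def depth_eff_order_mf(N: int) -> list:
--     # Bucket-by-key generation: emit pairs key by key in closed form,
--     # no sort needed (stable order within a key is ascending c).
--     out = []
--     for k in range(1, 2 * N - 2):
--         for c in range(max(0, k - N + 1), (k - 1) // 2 + 1):
--             out.append((2 * c + N - k, c))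
--     return out
-- ===== Notes on version B (the rewrite author's own statement) =====
-- stated objective: faster
-- what changed: B replaces generate-all-pairs-then-stable-sort-by-key with a direct closed-form emission of the pairs bucket by bucket (for each key k=1..2N-3 the matching column range is computed arithmetically), eliminating the sort entirely.
import Mathlib
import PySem

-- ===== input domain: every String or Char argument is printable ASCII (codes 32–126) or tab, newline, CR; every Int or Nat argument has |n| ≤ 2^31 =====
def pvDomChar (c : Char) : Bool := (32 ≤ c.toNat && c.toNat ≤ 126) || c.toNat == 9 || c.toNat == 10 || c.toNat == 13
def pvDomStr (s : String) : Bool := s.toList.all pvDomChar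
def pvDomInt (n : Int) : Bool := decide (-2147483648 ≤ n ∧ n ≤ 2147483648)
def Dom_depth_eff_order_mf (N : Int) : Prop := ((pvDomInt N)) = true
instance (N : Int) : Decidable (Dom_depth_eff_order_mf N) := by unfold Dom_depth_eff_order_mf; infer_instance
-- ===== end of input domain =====

-- B replaces "generate all pairs then stable-sort by the key 2*c-r+N" with a direct
-- closed-form emission of the pairs key by key (no sort): alternative algorithm, O(N^2) vs O(N^2 log N).

-- ===== PORT A =====
def depth_eff_order_mf (N : Int) : List (Int × Int) :=
  let l : List (Int × Int × Int) :=
    (PySem.List.pyRange 0 (N - 1) 1).foldl (fun acc c =>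
      (PySem.List.pyRange 1 N 1).foldl (fun acc2 r =>
        if r - c > 0 then acc2 ++ [(r, c, 2 * c - r + N)] else acc2) acc) []
  (PySem.List.sorted l (fun x => x.2.2)).map (fun a => (a.1, a.2.1))

-- ===== PORT B =====
def depth_eff_order_mf_alt (N : Int) : List (Int × Int) :=
  (PySem.List.pyRange 1 (2 * N - 2) 1).foldl (fun acc k =>
    (PySem.List.pyRange (max 0 (k - N + 1)) (PySem.Int.floordiv (k - 1) 2 + 1) 1).foldl
      (fun acc2 c => acc2 ++ [(2 * c + N - k, c)]) acc) []

-- ===== PRECONDITION & SPEC =====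
def Spec_depth_eff_order_mf (N : Int) (out : List (Int × Int)) : Prop := out = depth_eff_order_mf_alt N
instance (N : Int) (out : List (Int × Int)) : Decidable (Spec_depth_eff_order_mf N out) := by unfold Spec_depth_eff_order_mf; infer_instance

-- ===== CLAIM (what is proved, stated in full; the proofs are below) =====
def Claim_equal_depth_eff_order_mf : Prop := ∀ (N : Int), Dom_depth_eff_order_mf N → Spec_depth_eff_order_mf N (depth_eff_order_mf N)

-- ===== LEMMAS AND PROOFS =====

lemma pv_flatMap_congr_mem {α β : Type} (l : List α) (f g : α → List β)
    (h : ∀ x ∈ l, f x = g x) : l.flatMap f = l.flatMap g := by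
  simp only [List.flatMap_def]
  rw [List.map_congr_left h]

lemma pv_pyRange_pairwise_lt (a b : Int) : (PySem.List.pyRange a b 1).Pairwise (· < ·) := by
  rw [PySem.List.pyRange_one]
  exact List.pairwise_map.mpr ((List.pairwise_lt_range).imp (by intro i j h; omega))

lemma pv_pyRange_nodup (a b : Int) : (PySem.List.pyRange a b 1).Nodup :=
  (pv_pyRange_pairwise_lt a b).imp (fun h => by omega)

-- insertBy places x after every element it is not "before"
lemma pv_insertBy_all_before {α : Type} (before : α → α → Bool) (x : α) (l : List α)
    (h : ∀ y ∈ l, before x y = true) : PySem.List.insertBy before x l = x :: l := by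
  cases l with
  | nil => rfl
  | cons y t => simp [PySem.List.insertBy, h y (by simp)]

lemma pv_insertBy_append_not_before {α : Type} (before : α → α → Bool) (x : α)
    (b rest : List α) (h : ∀ y ∈ b, before x y = false) :
    PySem.List.insertBy before x (b ++ rest) = b ++ PySem.List.insertBy before x rest := by
  induction b with
  | nil => simp
  | cons y t ih =>
    simp only [List.cons_append, PySem.List.insertBy, h y (by simp)]
    simp [ih (fun z hz => h z (by simp [hz]))]

-- inserting x into a concatenation of key-homogeneous buckets with strictly increasing keys
lemma pv_insertBy_flatMap {α : Type} (key : α → Int) (ks : List Int)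
    (hks : ks.Pairwise (· < ·)) (buckets : Int → List α)
    (hb : ∀ k ∈ ks, ∀ y ∈ buckets k, key y = k) (x : α) (hx : key x ∈ ks) :
    PySem.List.insertBy (fun a b => decide (key a < key b)) x (ks.flatMap buckets)
      = ks.flatMap (fun k => if k = key x then buckets k ++ [x] else buckets k) := by
  induction ks with
  | nil => cases hx
  | cons k ks ih =>
    rcases List.pairwise_cons.mp hks with ⟨hklt, hks'⟩
    simp only [List.flatMap_cons]
    by_cases hk : k = key x
    · rw [pv_insertBy_append_not_before _ _ _ _
        (fun y hy => by simp [hb k (by simp) y hy, hk])]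
      rw [pv_insertBy_all_before _ _ _ (fun y hy => ?_)]
      · rw [if_pos hk]
        have hrest : (ks.flatMap fun k' => if k' = key x then buckets k' ++ [x] else buckets k')
            = ks.flatMap buckets := by
          apply pv_flatMap_congr_mem
          intro k' hk'
          rw [if_neg]
          have := hklt k' hk'
          omega
        rw [hrest]
        simp
      · obtain ⟨k', hk', hyk⟩ := List.mem_flatMap.mp hy
        have h1 := hb k' (by simp [hk']) y hyk
        have h2 := hklt k' hk'
        simp only [decide_eq_true_eq]
        omega
    · have hx' : key x ∈ ks := by
        rcases List.mem_cons.mp hx with h | h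
        · exact absurd h.symm hk
        · exact h
      have hkx : k < key x := hklt _ hx'
      rw [pv_insertBy_append_not_before _ _ _ _ (fun y hy => by
        have := hb k (by simp) y hy
        simp only [decide_eq_false_iff_not]
        omega)]
      rw [ih hks' (fun k hk y hy => hb k (by simp [hk]) y hy) hx', if_neg hk]

-- stable sort of a list whose keys all lie in a strictly increasing key list
-- is the concatenation of the filter-buckets, in key order
lemma pv_sorted_buckets {α : Type} (key : α → Int) (ks : List Int)
    (hks : ks.Pairwise (· < ·)) (xs : List α) (hmem : ∀ x ∈ xs, key x ∈ ks) :
    PySem.List.sorted xs key = ks.flatMap (fun k => xs.filter (fun a => key a == k)) := by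
  induction xs using List.reverseRecOn with
  | nil => simp [PySem.List.sorted_eq_foldl_insertBy]
  | append_singleton xs x ih =>
    rw [PySem.List.sorted_eq_foldl_insertBy, List.foldl_append]
    rw [← PySem.List.sorted_eq_foldl_insertBy]
    simp only [List.foldl_cons, List.foldl_nil]
    rw [ih (fun a ha => hmem a (by simp [ha]))]
    rw [pv_insertBy_flatMap key ks hks _
      (fun k _ y hy => by simpa using (List.mem_filter.mp hy).2)
      x (hmem x (by simp))]
    apply pv_flatMap_congr_mem
    intro k _
    by_cases h : k = key x
    · simp [List.filter_append, h]
    · have hne : (key x == k) = false := by simp; omega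
      simp [List.filter_append, hne, h]

-- a filter whose predicate pins the element to a single value v, on a nodup list
lemma pv_filter_eq_of_unique {l : List Int} (hnd : l.Nodup) (p : Int → Bool) (v : Int)
    (h : ∀ r, p r = true → r = v) :
    l.filter p = if v ∈ l ∧ p v = true then [v] else [] := by
  induction l with
  | nil => simp
  | cons x t ih =>
    rcases List.nodup_cons.mp hnd with ⟨hx, hnd'⟩
    by_cases hpx : p x = true
    · have hxv : x = v := h x hpx
      subst hxv
      have ht : t.filter p = [] := by
        rw [List.filter_eq_nil_iff]
        intro r hr hpr
        exact hx (h r hpr ▸ hr)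
      simp [hpx, ht]
    · rw [List.filter_cons_of_neg (by simpa using hpx), ih hnd']
      by_cases hv : v = x
      · subst hv
        simp [hpx]
      · simp [List.mem_cons, hv]
  
-- a flatMap of conditional singletons over a range collapses to the sub-range map
lemma pv_flatMap_if_range {α : Type} (a b lo hi : Int) (f : Int → α)
    (h1 : a ≤ lo) (h2 : hi + 1 ≤ b) (h3 : lo ≤ hi + 1) :
    (PySem.List.pyRange a b 1).flatMap (fun c => if lo ≤ c ∧ c ≤ hi then [f c] else [])
    = (PySem.List.pyRange lo (hi + 1) 1).map f := by
  rw [PySem.List.pyRange_one_append a lo b h1 (by omega),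
      PySem.List.pyRange_one_append lo (hi + 1) b h3 h2]
  simp only [List.flatMap_append]
  have e1 : (PySem.List.pyRange a lo 1).flatMap
      (fun c => if lo ≤ c ∧ c ≤ hi then [f c] else []) = [] := by
    rw [pv_flatMap_congr_mem _ _ (fun _ => []) ?_]
    · simp
    · intro c hc
      have := PySem.List.mem_pyRange_one.mp hc
      rw [if_neg (by omega)]
  have e2 : (PySem.List.pyRange lo (hi + 1) 1).flatMap
      (fun c => if lo ≤ c ∧ c ≤ hi then [f c] else [])
      = (PySem.List.pyRange lo (hi + 1) 1).map f := by
    rw [pv_flatMap_congr_mem _ _ (fun c => [f c]) ?_]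
    · simp [List.flatMap_def]
      induction (PySem.List.pyRange lo (hi + 1) 1) with
      | nil => rfl
      | cons y t iht => simp_all
    · intro c hc
      have := PySem.List.mem_pyRange_one.mp hc
      rw [if_pos (by omega)]
  have e3 : (PySem.List.pyRange (hi + 1) b 1).flatMap
      (fun c => if lo ≤ c ∧ c ≤ hi then [f c] else []) = [] := by
    rw [pv_flatMap_congr_mem _ _ (fun _ => []) ?_]
    · simp
    · intro c hc
      have := PySem.List.mem_pyRange_one.mp hc
      rw [if_neg (by omega)]
  rw [e1, e2, e3]
  simp

-- A's pre-sort list, in flatMap form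
lemma pv_A_list (N : Int) :
    (PySem.List.pyRange 0 (N - 1) 1).foldl (fun acc c =>
      (PySem.List.pyRange 1 N 1).foldl (fun acc2 r =>
        if r - c > 0 then acc2 ++ [(r, c, 2 * c - r + N)] else acc2) acc) ([] : List (Int × Int × Int))
    = (PySem.List.pyRange 0 (N - 1) 1).flatMap (fun c =>
        ((PySem.List.pyRange 1 N 1).filter (fun r => decide (r - c > 0))).map
          (fun r => (r, c, 2 * c - r + N))) := by
  rw [PySem.List.foldl_congr_mem _ _
    (fun acc c => acc ++ ((PySem.List.pyRange 1 N 1).filter (fun r => decide (r - c > 0))).map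
      (fun r => (r, c, 2 * c - r + N))) _
    (fun acc c _ => PySem.List.foldl_append_ite (fun r => r - c > 0) _ _ _)]
  rw [PySem.List.foldl_append_eq_flatMap]
  simp

-- the filter-bucket of A's list for a key k in range is exactly B's k-th run
lemma pv_bucket (N k : Int) (hk1 : 1 ≤ k) (hk2 : k < 2 * N - 2) :
    ((PySem.List.pyRange 0 (N - 1) 1).flatMap (fun c =>
        ((PySem.List.pyRange 1 N 1).filter (fun r => decide (r - c > 0))).map
          (fun r => (r, c, 2 * c - r + N)))).filter (fun a => a.2.2 == k)
    = (PySem.List.pyRange (max 0 (k - N + 1)) (PySem.Int.floordiv (k - 1) 2 + 1) 1).map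
        (fun c => (2 * c + N - k, c, k)) := by
  have hfd : PySem.Int.floordiv (k - 1) 2 = (k - 1) / 2 := by
    unfold PySem.Int.floordiv
    rw [Int.fdiv_eq_ediv]
    simp
  rw [List.filter_flatMap]
  have step : ∀ c ∈ PySem.List.pyRange 0 (N - 1) 1,
      (((PySem.List.pyRange 1 N 1).filter (fun r => decide (r - c > 0))).map
          (fun r => (r, c, 2 * c - r + N))).filter (fun a => a.2.2 == k)
      = if max 0 (k - N + 1) ≤ c ∧ c ≤ (k - 1) / 2 then [((2 * c + N - k, c, k) : Int × Int × Int)] else [] := by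
    intro c hc
    have hcr := PySem.List.mem_pyRange_one.mp hc
    rw [List.filter_map, List.filter_filter]
    have hcongr : ∀ r ∈ PySem.List.pyRange 1 N 1,
        ((((fun a : Int × Int × Int => a.2.2 == k) ∘ fun r => (r, c, 2 * c - r + N)) r) && decide (r - c > 0))
        = ((decide (r - c > 0) && decide (r = 2 * c + N - k)) : Bool) := by
      intro r _
      rw [Bool.eq_iff_iff]
      simp only [Function.comp_apply, Bool.and_eq_true, beq_iff_eq, decide_eq_true_eq]
      omega
    rw [List.filter_congr hcongr]
    rw [pv_filter_eq_of_unique (pv_pyRange_nodup 1 N)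
      (fun r => decide (r - c > 0) && decide (r = 2 * c + N - k)) (2 * c + N - k)
      (fun r h => by simpa using (Bool.and_elim_right h))]
    by_cases hcond : max 0 (k - N + 1) ≤ c ∧ c ≤ (k - 1) / 2
    · rw [if_pos ?_, if_pos hcond]
      · have h3 : 2 * c - (2 * c + N - k) + N = k := by omega
        simp [h3]
      · refine ⟨PySem.List.mem_pyRange_one.mpr (by omega), ?_⟩
        have hge : max 0 (k - N + 1) ≤ c := hcond.1
        have hle : 2 * c ≤ k - 1 := by omega
        simp only [Bool.and_eq_true, decide_eq_true_eq]
        exact ⟨by omega, trivial⟩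
    · rw [if_neg ?_, if_neg hcond]
      · simp
      · rintro ⟨hmem, hcnd⟩
        have := PySem.List.mem_pyRange_one.mp hmem
        simp only [Bool.and_eq_true, decide_eq_true_eq] at hcnd
        exact hcond (by omega)
  rw [pv_flatMap_congr_mem _ _ _ step]
  rw [pv_flatMap_if_range 0 (N - 1) (max 0 (k - N + 1)) ((k - 1) / 2)
    (fun c => (2 * c + N - k, c, k)) (by omega) (by omega) (by omega)]
  rw [hfd]

-- B's port, in flatMap form
lemma pv_B_eq (N : Int) :
    depth_eff_order_mf_alt N
    = (PySem.List.pyRange 1 (2 * N - 2) 1).flatMap (fun k =>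
        (PySem.List.pyRange (max 0 (k - N + 1)) (PySem.Int.floordiv (k - 1) 2 + 1) 1).map
          (fun c => (2 * c + N - k, c))) := by
  unfold depth_eff_order_mf_alt
  rw [PySem.List.foldl_congr_mem _ _
    (fun acc k => acc ++ (PySem.List.pyRange (max 0 (k - N + 1)) (PySem.Int.floordiv (k - 1) 2 + 1) 1).map
      (fun c => (2 * c + N - k, c))) _
    (fun acc k _ => PySem.List.foldl_append_singleton_eq_map _ _ _)]
  rw [PySem.List.foldl_append_eq_flatMap]
  simp

-- ===== VERDICT (by name: the statement is the Claim_ definition above) =====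
theorem depth_eff_order_mf_spec : Claim_equal_depth_eff_order_mf := by
  intro N _
  unfold Spec_depth_eff_order_mf
  show depth_eff_order_mf N = _
  simp only [depth_eff_order_mf]
  rw [pv_A_list]
  rw [pv_sorted_buckets (α := Int × Int × Int) (fun x => x.2.2) (PySem.List.pyRange 1 (2 * N - 2) 1)
    (pv_pyRange_pairwise_lt 1 (2 * N - 2)) _ ?hmem]
  case hmem =>
    intro x hx
    obtain ⟨c, hc, hx2⟩ := List.mem_flatMap.mp hx
    obtain ⟨r, hr, rfl⟩ := List.mem_map.mp hx2
    have hc' := PySem.List.mem_pyRange_one.mp hc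
    have hr' := PySem.List.mem_pyRange_one.mp (List.mem_filter.mp hr).1
    have hrc : r - c > 0 := by simpa using (List.mem_filter.mp hr).2
    exact PySem.List.mem_pyRange_one.mpr (by simp; omega)
  rw [pv_B_eq, List.map_flatMap]
  apply pv_flatMap_congr_mem
  intro k hk
  have hk' := PySem.List.mem_pyRange_one.mp hk
  rw [pv_bucket N k hk'.1 hk'.2, List.map_map]
  rfl
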